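-- pv_equiv track=rewrite | github.com/Python-roborock/local_roborock_server | src/roborock_local_server/bundled_backend/https_server/routes/user/app/info.py | _split_param_values
-- ===== SOURCE A (Python) =====
-- from typing import Any, Sequence
--
-- def _split_param_values(values: Sequence[str]) -> list[str]:
--     split_values: list[str] = []
--     for value in values:
--         for part in str(value or "").split(","):
--             candidate = part.strip()
--             if candidate:
--                 split_values.append(candidate)
--     return split_values
-- ===== SOURCE B (Python) =====
-- from typing import Any, Sequence
--
-- def _split_param_values(values: Sequence[str]) -> list[str]:
--     joined = ",".join(str(v or "") for v in values)
--     stripped = [part.strip() for part in joined.split(",")]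
--     return [candidate for candidate in stripped if candidate]
-- ===== Notes on version B (the rewrite author's own statement) =====
-- stated objective: alternative
-- what changed: B joins all inputs into one comma-separated string and does a single split plus one strip-and-filter pass, replacing A's nested outer-values/inner-parts loops with an explicit accumulator.
import Mathlib
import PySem

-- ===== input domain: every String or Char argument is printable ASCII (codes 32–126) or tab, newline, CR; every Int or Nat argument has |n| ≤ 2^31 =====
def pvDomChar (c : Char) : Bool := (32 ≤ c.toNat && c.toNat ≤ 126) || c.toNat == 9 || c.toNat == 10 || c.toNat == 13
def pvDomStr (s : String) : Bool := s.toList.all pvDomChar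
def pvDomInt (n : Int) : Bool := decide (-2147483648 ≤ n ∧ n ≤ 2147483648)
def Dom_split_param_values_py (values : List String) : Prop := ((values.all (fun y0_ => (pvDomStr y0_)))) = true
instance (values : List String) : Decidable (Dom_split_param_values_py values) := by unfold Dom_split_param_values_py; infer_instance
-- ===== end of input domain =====

-- B joins all inputs into one comma-separated string, then does a single split plus one strip-and-filter pass
-- (instead of A's nested loops with an explicit accumulator). Same exact output, same asymptotic cost.

-- ===== PORT A =====
-- `str(value or "")` is `value` itself: `value` is already a str, and `"" or ""` is `""`.
-- `.split(",")` is PySem.Str.split? with the nonempty literal separator ",", so it always returns `some`.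
def split_param_values_py (values : List String) : List String :=
  values.foldl (fun split_values value =>
    ((PySem.Str.split? value ",").getD []).foldl (fun split_values part =>
      let candidate := PySem.Str.strip part
      if candidate ≠ "" then split_values ++ [candidate] else split_values) split_values) []

-- ===== PORT B =====
def split_param_values_py_alt (values : List String) : List String :=
  let joined := PySem.Str.join "," values
  let stripped := ((PySem.Str.split? joined ",").getD []).map PySem.Str.strip
  stripped.filter (fun candidate => candidate ≠ "")

-- ===== PRECONDITION & SPEC =====
def Spec_split_param_values_py (values : List String) (out : List String) : Prop := out = split_param_values_py_alt values
instance (values : List String) (out : List String) : Decidable (Spec_split_param_values_py values out) := by unfold Spec_split_param_values_py; infer_instance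

-- ===== CLAIM (what is proved, stated in full; the proofs are below) =====
def Claim_equal_split_param_values_py : Prop := ∀ (values : List String), Dom_split_param_values_py values → Spec_split_param_values_py values (split_param_values_py values)

-- ===== LEMMAS AND PROOFS =====

-- Structural single-char comma split, used to characterise PySem's fuel-based splitOn.
def commaSplit : List Char → List (List Char)
  | [] => [[]]
  | c :: rest => if c = ',' then [] :: commaSplit rest else (commaSplit rest).modifyHead (c :: ·)

theorem commaSplit_ne_nil (l : List Char) : commaSplit l ≠ [] := by
  cases l with
  | nil => simp [commaSplit]
  | cons c rest =>
    simp only [commaSplit]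
    split
    · simp
    · cases h : commaSplit rest with
      | nil => exact absurd h (commaSplit_ne_nil rest)
      | cons a as => simp [List.modifyHead]

theorem go_comma (l : List Char) : ∀ (fuel : Nat), l.length + 1 ≤ fuel → ∀ (cur : List Char) (acc : List (List Char)),
    PySem.Chars.splitOn.go [','] fuel l cur acc = acc.reverse ++ (commaSplit l).modifyHead (cur.reverse ++ ·) := by
  induction l with
  | nil =>
    intro fuel hf cur acc
    match fuel, hf with
    | (f+1), _ => simp [PySem.Chars.splitOn.go, commaSplit]
  | cons c rest ih =>
    intro fuel hf cur acc
    match fuel, hf with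
    | (f+1), hf =>
      have hrest : rest.length + 1 ≤ f := by simpa using Nat.le_of_succ_le_succ hf
      simp only [PySem.Chars.splitOn.go]
      by_cases hc : c = ','
      · subst hc
        rw [if_pos (by simp [List.isPrefixOf])]
        rw [show List.drop ([','] : List Char).length (',' :: rest) = rest from rfl]
        rw [ih f hrest [] (cur.reverse :: acc)]
        simp only [commaSplit, List.reverse_cons, List.append_assoc, List.reverse_nil,
          List.nil_append, List.modifyHead, List.singleton_append]
        cases commaSplit rest <;> simp
      · rw [if_neg (by simp [List.isPrefixOf]; exact fun h => hc h.symm)]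
        rw [ih f hrest (c :: cur) acc]
        simp only [commaSplit, if_neg hc]
        cases h : commaSplit rest with
        | nil => exact absurd h (commaSplit_ne_nil rest)
        | cons a as => simp [List.modifyHead]

theorem splitOn_comma (s : List Char) : PySem.Chars.splitOn s [','] = commaSplit s := by
  show PySem.Chars.splitOn.go [','] (s.length + 1) s [] [] = commaSplit s
  rw [go_comma s (s.length + 1) le_rfl [] []]
  cases h : commaSplit s with
  | nil => exact absurd h (commaSplit_ne_nil s)
  | cons a as => simp [List.modifyHead]

theorem split_comma (s : String) :
    (PySem.Str.split? s ",").getD [] = (commaSplit s.toList).map String.ofList := by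
  rw [PySem.Str.split?.eq_1]
  have : (",".toList : List Char) = [','] := by decide
  rw [this, PySem.Chars.split?.eq_1]
  simp [splitOn_comma]

theorem commaSplit_append (a b : List Char) :
    commaSplit (a ++ ',' :: b) = commaSplit a ++ commaSplit b := by
  induction a with
  | nil => simp [commaSplit]
  | cons c a ih =>
    simp only [List.cons_append, commaSplit, ih]
    by_cases hc : c = ','
    · simp [hc]
    · rw [if_neg hc, if_neg hc]
      cases h : commaSplit a with
      | nil => exact absurd h (commaSplit_ne_nil a)
      | cons x xs => simp [List.modifyHead]

theorem commaSplit_intercalate (v : String) (vs : List String) :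
    commaSplit (List.intercalate [','] ((v :: vs).map String.toList)) =
      (v :: vs).flatMap (fun w => commaSplit w.toList) := by
  induction vs generalizing v with
  | nil => simp [List.intercalate]
  | cons w ws ih =>
    have : List.intercalate [','] ((v :: w :: ws).map String.toList) =
        v.toList ++ ',' :: List.intercalate [','] ((w :: ws).map String.toList) := by
      simp [List.intercalate]
    rw [this, commaSplit_append, ih w]
    simp

-- One value's contribution, after stripping and filtering.
def contrib (v : String) : List String :=
  (((commaSplit v.toList).map String.ofList).map PySem.Str.strip).filter (fun c => c ≠ "")

theorem portA_eq_flatMap (values : List String) :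
    split_param_values_py values = values.flatMap contrib := by
  unfold split_param_values_py
  suffices h : ∀ (acc : List String), values.foldl (fun split_values value =>
      ((PySem.Str.split? value ",").getD []).foldl (fun split_values part =>
        let candidate := PySem.Str.strip part
        if candidate ≠ "" then split_values ++ [candidate] else split_values) split_values) acc
      = acc ++ values.flatMap contrib by simpa using h []
  induction values with
  | nil => intro acc; simp
  | cons v vs ih =>
    intro acc
    simp only [List.foldl_cons, List.flatMap_cons, ih]
    rw [← List.append_assoc]
    congr 1
    rw [split_comma]
    show ((commaSplit v.toList).map String.ofList).foldl
      (fun split_values part => if PySem.Str.strip part ≠ "" then split_values ++ [PySem.Str.strip part] else split_values) acc = acc ++ contrib v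
    rw [show (fun (split_values : List String) part => if PySem.Str.strip part ≠ "" then split_values ++ [PySem.Str.strip part] else split_values) = (fun split_values part => (fun acc x => if x ≠ "" then acc ++ [x] else acc) split_values (PySem.Str.strip part)) from rfl]
    rw [← List.foldl_map (f := PySem.Str.strip)
      (g := fun (acc : List String) x => if x ≠ "" then acc ++ [x] else acc)
      (l := List.map String.ofList (commaSplit v.toList)) (init := acc)]
    rw [PySem.List.foldl_append_ite_eq_filter (fun c => c ≠ "")]
    rfl

theorem split_param_values_py_eq (values : List String) :
    split_param_values_py values = split_param_values_py_alt values := by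
  rw [portA_eq_flatMap]
  unfold split_param_values_py_alt
  cases values with
  | nil => decide
  | cons v vs =>
    simp only []
    rw [split_comma]
    rw [PySem.Str.toList_join]
    show (v :: vs).flatMap contrib = _
    have hj : (PySem.Chars.join (",".toList) ((v :: vs).map String.toList)) =
        List.intercalate [','] ((v :: vs).map String.toList) := by
      have : (",".toList : List Char) = [','] := by decide
      rw [this]; rfl
    rw [hj, commaSplit_intercalate]
    unfold contrib
    simp [List.filter_flatMap, List.map_flatMap]

-- ===== VERDICT (by name: the statement is the Claim_ definition above) =====
theorem split_param_values_py_spec : Claim_equal_split_param_values_py := by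
  intro values _
  exact split_param_values_py_eq values
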